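-- pv_equiv track=rewrite | github.com/bartli555/Functions | 7-19.py | f
-- ===== SOURCE A (Python) =====
-- def f(number):
--
--     number_str = str(number)
--     suma = 0
--
--     for znak_cyfry in '0123456789':
--         licznik = number_str.count(znak_cyfry)
--
--         if licznik >1:
--             suma += int(znak_cyfry) * licznik
--
--     return suma
-- ===== SOURCE B (Python) =====
-- def f(number):
--     chars = sorted(str(number))
--     total = 0
--     while chars:
--         c = chars[0]
--         run = 1
--         while run < len(chars) and chars[run] == c:
--             run += 1
--         if c.isdigit() and run > 1:
--             total += int(c) * run
--         chars = chars[run:]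
--     return total
-- ===== Notes on version B (the rewrite author's own statement) =====
-- stated objective: alternative
-- what changed: A scans str(number) ten times, once per digit of the fixed alphabet via .count; B sorts the characters once and does a single run-length scan over the sorted list, adding int(c)*runlength for each repeated digit run (equal characters are contiguous after sorting, so a run length is exactly that character's multiplicity).
import Mathlib
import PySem

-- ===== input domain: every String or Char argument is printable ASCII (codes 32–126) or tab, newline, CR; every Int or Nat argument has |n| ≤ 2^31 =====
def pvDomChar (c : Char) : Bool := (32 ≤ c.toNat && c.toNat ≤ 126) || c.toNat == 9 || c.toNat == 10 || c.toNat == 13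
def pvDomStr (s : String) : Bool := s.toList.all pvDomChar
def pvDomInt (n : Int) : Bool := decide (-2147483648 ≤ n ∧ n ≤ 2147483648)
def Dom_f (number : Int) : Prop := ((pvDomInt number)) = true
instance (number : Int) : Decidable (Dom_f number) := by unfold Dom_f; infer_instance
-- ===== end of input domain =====

-- B replaces A's ten `.count` scans over the fixed digit alphabet with a different algorithm:
-- sort the characters once, then one run-length scan over the sorted list (objective: alternative).

-- ===== PORT A =====
-- int(znak_cyfry) on a one-char digit string: PySem.Int.ofChars? is always `some` here,
-- so the `.getD 0` default never fires.
def f (number : Int) : Int :=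
  let number_str := PySem.Int.toStr number
  "0123456789".toList.foldl
    (fun suma znak_cyfry =>
      let licznik : Nat := PySem.Str.count number_str (String.ofList [znak_cyfry])
      if licznik > 1 then suma + (PySem.Int.ofChars? [znak_cyfry]).getD 0 * (licznik : Int)
      else suma) 0

-- ===== PORT B =====
-- the outer while loop of Source B: chars is sorted, c = chars[0]; the inner while computes
-- run = 1 + length of the leading block of chars[1:] equal to c (takeWhile), the run is
-- added if c is a digit and run > 1, and chars = chars[run:] is the dropWhile remainder.
def pvRunScan (chars : List Char) (total : Int) : Int :=
  match chars with
  | [] => total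
  | c :: rest =>
      let run : Nat := 1 + (rest.takeWhile (fun x => x == c)).length
      let total' : Int :=
        if PySem.Chars.isdigit c ∧ 1 < run then
          total + (PySem.Int.ofChars? [c]).getD 0 * (run : Int)
        else total
      pvRunScan (rest.dropWhile (fun x => x == c)) total'
termination_by chars.length
decreasing_by
  simpa using Nat.lt_succ_of_le (List.length_dropWhile_le _ _)

def f_alt (number : Int) : Int :=
  pvRunScan (PySem.List.sorted (PySem.Int.toStr number).toList (fun c => c) false) 0

-- ===== PRECONDITION & SPEC =====
def Spec_f (number : Int) (out : Int) : Prop := out = f_alt number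
instance (number : Int) (out : Int) : Decidable (Spec_f number out) := by unfold Spec_f; infer_instance

-- ===== CLAIM (what is proved, stated in full; the proofs are below) =====
def Claim_equal_f : Prop := ∀ (number : Int), Dom_f number → Spec_f number (f number)

-- ===== LEMMAS AND PROOFS =====

def pvDigits : List Char := ['0','1','2','3','4','5','6','7','8','9']

def pvVal (c : Char) : Int := (PySem.Int.ofChars? [c]).getD 0

-- the common yardstick both programs are reduced to: the multiplicity-weighted digit sum
def pvS (l : List Char) : Int :=
  (pvDigits.map (fun d => if 1 < l.count d then pvVal d * (l.count d : Int) else 0)).sum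

-- s.count(one_char_substring) equals the plain character count of the underlying list
lemma count_go_single (c : Char) : ∀ (l : List Char) (fuel acc : Nat), l.length ≤ fuel →
    PySem.Chars.count.go [c] fuel l acc = acc + l.count c := by
  intro l
  induction l with
  | nil => intro fuel acc _; cases fuel <;> simp [PySem.Chars.count.go]
  | cons h t ih =>
    intro fuel acc hle
    cases fuel with
    | zero => simp at hle
    | succ n =>
      have hlen : t.length ≤ n := by simpa using hle
      by_cases hc : c = h
      · subst hc
        have hstep : PySem.Chars.count.go [c] (n+1) (c :: t) acc
            = PySem.Chars.count.go [c] n t (acc + 1) := by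
          simp [PySem.Chars.count.go, List.isPrefixOf]
        rw [hstep, ih n (acc+1) hlen]
        simp; omega
      · have hb : (c == h) = false := by simp [hc]
        have hstep : PySem.Chars.count.go [c] (n+1) (h :: t) acc
            = PySem.Chars.count.go [c] n t acc := by
          simp [PySem.Chars.count.go, List.isPrefixOf, hb]
        rw [hstep, ih n acc hlen]
        simp [Ne.symm hc]

lemma str_count_single (s : String) (c : Char) :
    PySem.Str.count s (String.ofList [c]) = s.toList.count c := by
  have h1 : (String.ofList [c]).toList = [c] := by simp
  simp only [PySem.Str.count, h1, PySem.Chars.count, List.isEmpty]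
  rw [count_go_single c s.toList s.toList.length 0 le_rfl]
  simp

lemma mem_digits_iff (c : Char) : c ∈ pvDigits ↔ PySem.Chars.isdigit c = true := by
  constructor
  · intro h; fin_cases h <;> decide
  · intro h
    simp only [PySem.Chars.isdigit, Bool.and_eq_true, decide_eq_true_eq] at h
    obtain ⟨h1, h2⟩ := h
    have hlo : 48 ≤ c.toNat := h1
    have hhi : c.toNat ≤ 57 := h2
    have hc := Char.ofNat_toNat c
    interval_cases hn : c.toNat <;> exact hc ▸ (by decide)

-- A equals the yardstick sum on the character list of str(number)
theorem f_eq_pvS (number : Int) : f number = pvS (PySem.Int.toStr number).toList := by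
  unfold f pvS
  have hd : "0123456789".toList = pvDigits := by decide
  simp only [hd, str_count_single]
  have hbody : ∀ (suma : Int) (c : Char),
      (if ((PySem.Int.toStr number).toList.count c) > 1 then
        suma + (PySem.Int.ofChars? [c]).getD 0 * (((PySem.Int.toStr number).toList.count c : Nat) : Int)
      else suma)
      = suma + (if 1 < (PySem.Int.toStr number).toList.count c then
          pvVal c * (((PySem.Int.toStr number).toList.count c : Nat) : Int) else 0) := by
    intro suma c; unfold pvVal; split_ifs <;> simp
  simp only [hbody]
  rw [PySem.List.foldl_add]
  simp

-- pvS depends only on character multiplicities, so it is invariant under permutation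
lemma pvS_perm {l r : List Char} (h : l.Perm r) : pvS l = pvS r := by
  unfold pvS
  congr 1
  apply List.map_congr_left
  intro d _
  rw [h.count_eq]

-- removing all copies of one character c from the multiset changes pvS by c's own term
lemma pvS_update (ds : List Char) (hnd : ds.Nodup) (l r : List Char) (c : Char)
    (h1 : ∀ d, d ≠ c → l.count d = r.count d) (h2 : r.count c = 0) :
    (ds.map (fun d => if 1 < l.count d then pvVal d * (l.count d : Int) else 0)).sum
      = (ds.map (fun d => if 1 < r.count d then pvVal d * (r.count d : Int) else 0)).sum
        + (if c ∈ ds ∧ 1 < l.count c then pvVal c * (l.count c : Int) else 0) := by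
  induction ds with
  | nil => simp
  | cons d ds' ih =>
    have hnd' : ds'.Nodup := hnd.of_cons
    by_cases hdc : d = c
    · subst hdc
      have hcds' : d ∉ ds' := (List.nodup_cons.mp hnd).1
      have htail : ∀ e ∈ ds', (if 1 < l.count e then pvVal e * (l.count e : Int) else 0)
          = (if 1 < r.count e then pvVal e * (r.count e : Int) else 0) := by
        intro e he
        have hne : e ≠ d := fun h => hcds' (h ▸ he)
        rw [h1 e hne]
      have hmap : (ds'.map (fun e => if 1 < l.count e then pvVal e * (l.count e : Int) else 0))
          = (ds'.map (fun e => if 1 < r.count e then pvVal e * (r.count e : Int) else 0)) :=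
        List.map_congr_left htail
      simp only [List.map_cons, List.sum_cons, hmap, h2, List.mem_cons]
      simp only [Nat.not_lt_zero, if_false, true_or, true_and]
      ring
    · have hcond : (c ∈ d :: ds' ∧ 1 < l.count c) ↔ (c ∈ ds' ∧ 1 < l.count c) := by
        simp [List.mem_cons, Ne.symm hdc]
      simp only [List.map_cons, List.sum_cons, ih hnd', h1 d hdc]
      rw [if_congr hcond rfl rfl]
      ring
  
lemma nodup_digits : pvDigits.Nodup := by decide

-- in a ≤-sorted list headed by c, dropWhile (== c) contains no further copy of c
lemma no_c_after_drop : ∀ (rest : List Char) (c : Char),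
    (c :: rest).Pairwise (· ≤ ·) → (rest.dropWhile (fun x => x == c)).count c = 0 := by
  intro rest
  induction rest with
  | nil => intro c _; simp
  | cons r rs ih =>
    intro c hp
    by_cases hrc : r = c
    · subst hrc
      have hp' : (r :: rs).Pairwise (· ≤ ·) := by
        have h1 := (List.pairwise_cons.mp hp).1
        have h2 := (List.pairwise_cons.mp hp).2
        exact List.pairwise_cons.mpr ⟨fun y hy => (List.pairwise_cons.mp h2).1 y hy, (List.pairwise_cons.mp h2).2⟩
      have := ih r hp'
      simpa [List.dropWhile] using this
    · have hb : (r == c) = false := by simp [hrc]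
      simp only [List.dropWhile, hb]
      rw [List.count_eq_zero]
      intro hmem
      have hcr : c ≤ r := (List.pairwise_cons.mp hp).1 r (List.mem_cons_self ..)
      have hclt : c < r := lt_of_le_of_ne hcr (fun h => hrc h.symm)
      rcases List.mem_cons.mp hmem with h | h
      · exact hrc h.symm
      · have hre : r ≤ c := (List.pairwise_cons.mp (List.pairwise_cons.mp hp).2).1 c h
        exact absurd (lt_of_lt_of_le hclt hre) (lt_irrefl c)

-- the run-length scan of a ≤-sorted list computes the yardstick sum
lemma pvRunScan_eq_fuel : ∀ (n : Nat) (l : List Char), l.length ≤ n → l.Pairwise (· ≤ ·) → ∀ (t : Int),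
    pvRunScan l t = t + pvS l := by
  intro n
  induction n with
  | zero =>
    intro l hl _ t
    match l, hl with
    | [], _ => simp [pvRunScan, pvS, pvDigits]
  | succ m ih =>
    intro l hl hp t
    match l with
    | [] => simp [pvRunScan, pvS, pvDigits]
    | c :: rest =>
    have hdrop_sub : (rest.dropWhile (fun x => x == c)).Sublist (c :: rest) :=
      (List.dropWhile_sublist _).trans (List.sublist_cons_self c rest)
    have hdrop_p : (rest.dropWhile (fun x => x == c)).Pairwise (· ≤ ·) :=
      hp.sublist hdrop_sub
    have hlen : (rest.dropWhile (fun x => x == c)).length ≤ m := by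
      have h1 := List.length_dropWhile_le (fun x => x == c) rest
      simp only [List.length_cons] at hl
      omega
    -- decomposition counts
    have hsplit : rest = rest.takeWhile (fun x => x == c) ++ rest.dropWhile (fun x => x == c) :=
      (List.takeWhile_append_dropWhile ..).symm
    have htake_all : ∀ x ∈ rest.takeWhile (fun x => x == c), x = c := by
      intro x hx
      have := List.mem_takeWhile_imp hx
      simpa using this
    have hdc := no_c_after_drop rest c hp
    have hcount_c : (c :: rest).count c = 1 + (rest.takeWhile (fun x => x == c)).length := by
      nth_rewrite 1 [hsplit]
      rw [← List.cons_append, List.count_append]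
      rw [hdc]
      have : (c :: rest.takeWhile (fun x => x == c)).count c
          = (c :: rest.takeWhile (fun x => x == c)).length := by
        rw [List.count_eq_length]
        intro x hx
        rcases List.mem_cons.mp hx with h | h
        · simp [h]
        · simp [htake_all x h]
      rw [this]
      simp only [List.length_cons]
      omega
    have hcount_d : ∀ d, d ≠ c → (c :: rest).count d = (rest.dropWhile (fun x => x == c)).count d := by
      intro d hd
      nth_rewrite 1 [hsplit]
      rw [← List.cons_append, List.count_append]
      have : (c :: rest.takeWhile (fun x => x == c)).count d = 0 := by
        rw [List.count_eq_zero]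
        intro hmem
        rcases List.mem_cons.mp hmem with h | h
        · exact hd (h ▸ rfl)
        · exact hd (htake_all d h)
      rw [this]; omega
    -- unfold one step of the scan
    rw [pvRunScan]
    rw [ih _ hlen hdrop_p]
    have hupd := pvS_update pvDigits nodup_digits (c :: rest)
      (rest.dropWhile (fun x => x == c)) c hcount_d hdc
    have hS : pvS (c :: rest) = pvS (rest.dropWhile (fun x => x == c))
        + (if c ∈ pvDigits ∧ 1 < (c :: rest).count c then pvVal c * ((c :: rest).count c : Int) else 0) := by
      unfold pvS; exact hupd
    rw [hS, hcount_c]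
    have hmem : (c ∈ pvDigits ∧ 1 < 1 + (rest.takeWhile (fun x => x == c)).length)
        ↔ (PySem.Chars.isdigit c = true ∧ 1 < 1 + (rest.takeWhile (fun x => x == c)).length) := by
      rw [mem_digits_iff]
    rw [if_congr hmem rfl rfl]
    unfold pvVal
    split_ifs with h
    · push_cast; ring
    · ring

theorem f_spec' (number : Int) : f number = f_alt number := by
  rw [f_eq_pvS]
  unfold f_alt
  set cs := (PySem.Int.toStr number).toList with hcs
  have hperm : (PySem.List.sorted cs (fun c => c) false).Perm cs := PySem.List.sorted_perm ..
  have hpw : (PySem.List.sorted cs (fun c => c) false).Pairwise (· ≤ ·) := by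
    simpa using PySem.List.sorted_pairwise cs (fun c => c)
  rw [pvRunScan_eq_fuel _ _ le_rfl hpw 0, zero_add]
  exact (pvS_perm hperm).symm

-- ===== VERDICT (by name: the statement is the Claim_ definition above) =====
theorem f_spec : Claim_equal_f := by
  intro number _
  unfold Spec_f
  exact f_spec' number
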